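-- pv_equiv track=rewrite | github.com/Frontman-11/Male-and-Female-Gender-Classifier | src/utils.py | stack_filepaths
-- ===== SOURCE A (Python) =====
-- def stack_filepaths(paths: list, max_length=None):
--     """
--     Stack file paths into a single list, repeating entries to match the maximum length.
--
--     Args:
--         paths (list of list of str): List of lists containing file paths.
--         max_length (int, optional): Maximum length to stack file paths. Defaults to None.
--
--     Returns:
--         list of str: Stacked file paths.
--     """
--     length = max_length or max(len(path) for path in paths)
--
--     filepaths = []
--     for i in range(length):
--         for path in paths:
--             try:
--                 filepaths.extend([path[i]])
--             except IndexError: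
--                 continue
--     return filepaths
-- ===== SOURCE B (Python) =====
-- def stack_filepaths(paths: list, max_length=None):
--     length = max_length or max(len(path) for path in paths)
--     out = []
--     remaining = paths
--     n = max(length, 0)
--     while n > 0 and any(remaining):
--         out.extend(path[0] for path in remaining if path)
--         remaining = [path[1:] for path in remaining]
--         n -= 1
--     return out
-- ===== Notes on version B (the rewrite author's own statement) =====
-- stated objective: alternative
-- what changed: A probes path[i] by index with try/except for every i in range(length); B instead peels the heads of all lists each round and drops to the tails, stopping as soon as every list is exhausted.
import Mathlib
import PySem

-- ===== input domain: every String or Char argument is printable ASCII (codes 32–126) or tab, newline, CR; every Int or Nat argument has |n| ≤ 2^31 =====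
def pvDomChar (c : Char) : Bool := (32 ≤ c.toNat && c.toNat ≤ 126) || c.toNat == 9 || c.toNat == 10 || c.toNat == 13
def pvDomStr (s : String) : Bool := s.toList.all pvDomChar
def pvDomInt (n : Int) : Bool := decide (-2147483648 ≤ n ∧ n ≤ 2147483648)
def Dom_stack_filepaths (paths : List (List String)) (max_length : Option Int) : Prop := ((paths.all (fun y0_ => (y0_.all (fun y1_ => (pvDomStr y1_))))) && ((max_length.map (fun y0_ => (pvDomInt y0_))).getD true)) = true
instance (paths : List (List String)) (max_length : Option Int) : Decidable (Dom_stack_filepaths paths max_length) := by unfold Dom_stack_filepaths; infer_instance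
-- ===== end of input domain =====

-- B replaces A's index/try-except column probing by a peel-heads/drop-tails loop that stops
-- once every list is exhausted (objective: alternative; faster only when max_length far exceeds the lists).

-- ===== PORT A =====
-- length = max_length or max(len(path) for path in paths)  (Python truthiness: 0 / None fall through;
-- on empty paths Python max() raises ValueError — those inputs are outside Pre_, here the fold returns 0)
def pvLenA (paths : List (List String)) (max_length : Option Int) : Int :=
  match max_length with
  | some m => if m ≠ 0 then m else (paths.map (fun p => (p.length : Int))).foldl max 0
  | none => (paths.map (fun p => (p.length : Int))).foldl max 0

def stack_filepaths (paths : List (List String)) (max_length : Option Int) : List String :=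
  (PySem.List.pyRange 0 (pvLenA paths max_length) 1).foldl (fun acc i =>
    paths.foldl (fun acc2 p =>
      match PySem.List.pyGet? p i with
      | some s => acc2 ++ [s]        -- filepaths.extend([path[i]])
      | none => acc2) acc) []        -- except IndexError: continue

-- ===== PORT B =====
-- while n > 0 and any(remaining): out += heads; remaining = tails; n -= 1
def pvLoopB (n : Nat) (remaining : List (List String)) (out : List String) : List String :=
  match n with
  | 0 => out
  | n + 1 =>
    if remaining.any (fun p => !p.isEmpty) then
      pvLoopB n (remaining.map (List.drop 1)) (out ++ remaining.filterMap List.head?)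
    else out

def stack_filepaths_alt (paths : List (List String)) (max_length : Option Int) : List String :=
  pvLoopB (max (pvLenA paths max_length) 0).toNat paths []

-- ===== PRECONDITION & SPEC =====
-- Pre_ excludes only the inputs where Python A raises ValueError: max() of an empty sequence,
-- reached when paths = [] and max_length is falsy (None or 0).
def Pre_stack_filepaths (paths : List (List String)) (max_length : Option Int) : Prop :=
  (max_length = none ∨ max_length = some 0) → paths ≠ []
instance (paths : List (List String)) (max_length : Option Int) : Decidable (Pre_stack_filepaths paths max_length) := by unfold Pre_stack_filepaths; infer_instance

def pvWitness_stack_filepaths : List (List String) × Option Int := ([["a"], ["b", "c"]], none)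

def Spec_stack_filepaths (paths : List (List String)) (max_length : Option Int) (out : List String) : Prop := out = stack_filepaths_alt paths max_length
instance (paths : List (List String)) (max_length : Option Int) (out : List String) : Decidable (Spec_stack_filepaths paths max_length out) := by unfold Spec_stack_filepaths; infer_instance

-- ===== CLAIM (what is proved, stated in full; the proofs are below) =====
def Claim_equal_stack_filepaths : Prop := ∀ (paths : List (List String)) (max_length : Option Int), Dom_stack_filepaths paths max_length → Pre_stack_filepaths paths max_length → Spec_stack_filepaths paths max_length (stack_filepaths paths max_length)

-- ===== LEMMAS AND PROOFS =====

-- the common specification: successive columns of paths, n of them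
def pvCols (n : Nat) (ps : List (List String)) : List String :=
  match n with
  | 0 => []
  | n + 1 => ps.filterMap List.head? ++ pvCols n (ps.map (List.drop 1))

-- A's inner loop appends column i
theorem inner_eq (ps : List (List String)) (i : Int) (acc : List String) :
    ps.foldl (fun acc2 p =>
      match PySem.List.pyGet? p i with
      | some s => acc2 ++ [s]
      | none => acc2) acc = acc ++ ps.filterMap (fun p => PySem.List.pyGet? p i) := by
  induction ps generalizing acc with
  | nil => simp
  | cons p ps ih =>
    cases h : PySem.List.pyGet? p i <;> simp [List.foldl_cons, h, ih]

theorem get?_succ (p : List String) (k : Nat) : p[k + 1]? = (List.drop 1 p)[k]? := by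
  cases p <;> simp

-- the flatMap of columns 0..n-1 is pvCols n
theorem cols_flat (n : Nat) (ps : List (List String)) :
    (List.range n).flatMap (fun k => ps.filterMap (fun p => p[k]?)) = pvCols n ps := by
  induction n generalizing ps with
  | zero => rfl
  | succ n ih =>
    rw [List.range_succ_eq_map, List.flatMap_cons, List.flatMap_map]
    have h0 : ps.filterMap (fun p => p[0]?) = ps.filterMap List.head? := by
      apply List.filterMap_congr
      intro p _
      cases p <;> simp
    have h1 : (fun (k : Nat) => ps.filterMap (fun p => p[k + 1]?))
        = fun k => (ps.map (List.drop 1)).filterMap (fun p => p[k]?) := by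
      funext k
      rw [List.filterMap_map]
      exact List.filterMap_congr (fun p _ => get?_succ p k)
    rw [h0, h1, ih]
    rfl

-- when every list is exhausted, all remaining columns are empty
theorem pvCols_all_nil (n : Nat) (ps : List (List String)) (h : ∀ p ∈ ps, p = []) :
    pvCols n ps = [] := by
  induction n generalizing ps with
  | zero => rfl
  | succ n ih =>
    have h1 : ps.filterMap List.head? = [] := by
      rw [List.filterMap_eq_nil_iff]
      intro p hp
      rw [h p hp]
      rfl
    have h2 : ps.map (List.drop 1) = ps := by
      calc ps.map (List.drop 1) = ps.map id :=
            List.map_congr_left (fun p hp => by rw [h p hp]; rfl)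
        _ = ps := List.map_id ps
    rw [pvCols, h1, h2, ih ps h]
    rfl

-- B's loop yields pvCols n
theorem b_loop_eq (n : Nat) (ps : List (List String)) (out : List String) :
    pvLoopB n ps out = out ++ pvCols n ps := by
  induction n generalizing ps out with
  | zero => simp [pvLoopB, pvCols]
  | succ n ih =>
    rw [pvLoopB]
    split
    · rw [ih, pvCols, List.append_assoc]
    · rename_i h
      have hall : ∀ p ∈ ps, p = [] := by
        intro p hp
        by_contra hne
        exact h (List.any_eq_true.mpr ⟨p, hp, by simpa [List.isEmpty_iff] using hne⟩)
      rw [pvCols_all_nil (n + 1) ps hall, List.append_nil]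

theorem ports_eq (paths : List (List String)) (max_length : Option Int) :
    stack_filepaths paths max_length = stack_filepaths_alt paths max_length := by
  unfold stack_filepaths stack_filepaths_alt
  rw [PySem.List.pyRange_one, List.foldl_map]
  have hN : (pvLenA paths max_length - 0).toNat = (max (pvLenA paths max_length) 0).toNat := by
    omega
  rw [hN, b_loop_eq, List.nil_append]
  have hf : (fun (acc : List String) (k : Nat) =>
      paths.foldl (fun acc2 p =>
        match PySem.List.pyGet? p ((0 : Int) + k) with
        | some s => acc2 ++ [s]
        | none => acc2) acc)
      = fun acc k => acc ++ paths.filterMap (fun p => p[k]?) := by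
    funext acc k
    rw [inner_eq]
    congr 1
    apply List.filterMap_congr
    intro p _
    rw [zero_add, PySem.List.pyGet?_natCast]
  rw [hf, PySem.List.foldl_append_eq_flatMap, List.nil_append, cols_flat]

-- ===== VERDICT (by name: the statement is the Claim_ definition above) =====
theorem stack_filepaths_spec : Claim_equal_stack_filepaths := by
  intro paths max_length _ _
  unfold Spec_stack_filepaths
  exact ports_eq paths max_length
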